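-- pv_equiv track=rewrite | github.com/NathanQuinton01/Townsuite-Assessment | ScaleTestQuestion/ScaleBalance.py | getGreedyPick
-- ===== SOURCE A (Python) =====
-- def getGreedyPick(runningTotal, weights, goal):
--     maxValue = 0
--     selected = 0
--     for item in weights:
--         tempTotal = runningTotal + item
--         if (tempTotal <= goal) and (tempTotal > maxValue):
--             maxValue = tempTotal
--             selected = item
--     return selected
-- ===== SOURCE B (Python) =====
-- def getGreedyPick(runningTotal, weights, goal):
--     for item in sorted(weights, reverse=True):
--         tempTotal = runningTotal + item
--         if 0 < tempTotal <= goal: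
--             return item
--     return 0
-- ===== Notes on version B (the rewrite author's own statement) =====
-- stated objective: alternative
-- what changed: Replaces the scan-and-track-maximum loop by sorting a copy of the weights in descending order and returning the first item whose new total lies in (0, goal].
import Mathlib
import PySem

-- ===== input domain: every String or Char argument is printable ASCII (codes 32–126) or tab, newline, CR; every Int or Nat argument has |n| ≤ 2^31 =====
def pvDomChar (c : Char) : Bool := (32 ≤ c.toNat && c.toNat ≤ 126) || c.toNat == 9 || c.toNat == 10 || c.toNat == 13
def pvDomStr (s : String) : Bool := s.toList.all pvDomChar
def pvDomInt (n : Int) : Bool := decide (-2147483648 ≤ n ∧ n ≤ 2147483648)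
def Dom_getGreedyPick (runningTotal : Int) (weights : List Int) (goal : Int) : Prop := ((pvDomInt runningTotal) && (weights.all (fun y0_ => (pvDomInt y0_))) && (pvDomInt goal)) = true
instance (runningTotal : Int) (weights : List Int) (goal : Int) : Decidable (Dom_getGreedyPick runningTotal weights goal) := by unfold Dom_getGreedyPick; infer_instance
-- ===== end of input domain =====

-- B replaces A's scan-and-track-maximum loop by sorting a copy of the weights in
-- descending order and returning the first item whose new total lies in (0, goal]
-- (objective: alternative decomposition; the input list is not mutated by either).


-- ===== PORT A =====
def getGreedyPick (runningTotal : Int) (weights : List Int) (goal : Int) : Int :=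
  (weights.foldl
    (fun (st : Int × Int) item =>
      let tempTotal := runningTotal + item
      if tempTotal ≤ goal ∧ st.1 < tempTotal then (tempTotal, item) else st)
    (0, 0)).2

-- ===== PORT B =====
-- the for-loop with early return: first item of the (descending-sorted) list whose new total is in (0, goal]
def pvFirstFeasible (runningTotal goal : Int) : List Int → Int
  | [] => 0
  | item :: rest =>
      if 0 < runningTotal + item ∧ runningTotal + item ≤ goal then item
      else pvFirstFeasible runningTotal goal rest

def getGreedyPick_alt (runningTotal : Int) (weights : List Int) (goal : Int) : Int :=
  pvFirstFeasible runningTotal goal (PySem.List.sorted weights (fun x => x) true)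

-- ===== PRECONDITION & SPEC =====
def Spec_getGreedyPick (runningTotal : Int) (weights : List Int) (goal : Int) (out : Int) : Prop := out = getGreedyPick_alt runningTotal weights goal
instance (runningTotal : Int) (weights : List Int) (goal : Int) (out : Int) : Decidable (Spec_getGreedyPick runningTotal weights goal out) := by unfold Spec_getGreedyPick; infer_instance

-- ===== CLAIM (what is proved, stated in full; the proofs are below) =====
def Claim_equal_getGreedyPick : Prop := ∀ (runningTotal : Int) (weights : List Int) (goal : Int), Dom_getGreedyPick runningTotal weights goal → Spec_getGreedyPick runningTotal weights goal (getGreedyPick runningTotal weights goal)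

-- ===== LEMMAS AND PROOFS =====
-- the "best achievable total so far" fold both programs are about
def pvBest (rt goal : Int) (l : List Int) (m : Int) : Int :=
  l.foldl (fun acc x => if rt + x ≤ goal ∧ acc < rt + x then rt + x else acc) m

theorem pvBest_nil (rt goal m : Int) : pvBest rt goal [] m = m := rfl

theorem pvBest_cons (rt goal m x : Int) (xs : List Int) :
    pvBest rt goal (x :: xs) m
      = pvBest rt goal xs (if rt + x ≤ goal ∧ m < rt + x then rt + x else m) := rfl

theorem le_pvBest (rt goal : Int) (l : List Int) (m : Int) : m ≤ pvBest rt goal l m := by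
  induction l generalizing m with
  | nil => exact le_refl m
  | cons x xs ih =>
      rw [pvBest_cons]
      by_cases h : rt + x ≤ goal ∧ m < rt + x
      · simp only [if_pos h]; exact le_trans (le_of_lt h.2) (ih (rt + x))
      · simp only [if_neg h]; exact ih m

theorem pvBest_const (rt goal : Int) (l : List Int) (m : Int)
    (h : ∀ y ∈ l, rt + y ≤ m) : pvBest rt goal l m = m := by
  induction l with
  | nil => rfl
  | cons x xs ih =>
      rw [pvBest_cons]
      have hx : ¬ (rt + x ≤ goal ∧ m < rt + x) := by
        intro hc; exact absurd (h x (by simp)) (by omega)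
      rw [if_neg hx]
      exact ih (fun y hy => h y (by simp [hy]))

theorem pvBest_perm (rt goal : Int) {l₁ l₂ : List Int} (hp : l₁.Perm l₂) (m : Int) :
    pvBest rt goal l₁ m = pvBest rt goal l₂ m := by
  unfold pvBest
  letI : RightCommutative (fun (acc x : Int) => if rt + x ≤ goal ∧ acc < rt + x then rt + x else acc) :=
    ⟨by intro a x y; by_cases h1 : rt + x ≤ goal ∧ a < rt + x <;> by_cases h2 : rt + y ≤ goal ∧ a < rt + y <;> simp [h1, h2] <;> omega⟩
  exact hp.foldl_eq m

-- A's loop, with a generalized accumulator satisfying its invariant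
theorem getGreedyPick_loop (rt goal : Int) (l : List Int) :
    ∀ m s : Int, 0 ≤ m → (0 < m → m = rt + s) → (m = 0 → s = 0) →
      (l.foldl
        (fun (st : Int × Int) item =>
          let tempTotal := rt + item
          if tempTotal ≤ goal ∧ st.1 < tempTotal then (tempTotal, item) else st)
        (m, s)).2
      = if pvBest rt goal l m = m then s else pvBest rt goal l m - rt := by
  induction l with
  | nil => intro m s _ _ _; simp [pvBest_nil]
  | cons x xs ih =>
      intro m s hm hms hs0
      simp only [List.foldl_cons]
      rw [pvBest_cons]
      by_cases h : rt + x ≤ goal ∧ m < rt + x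
      · simp only [if_pos h]
        have hrec := ih (rt + x) x (by omega) (fun _ => rfl) (by omega)
        rw [hrec]
        have hge : rt + x ≤ pvBest rt goal xs (rt + x) := le_pvBest rt goal xs (rt + x)
        have hne : pvBest rt goal xs (rt + x) ≠ m := by omega
        rw [if_neg hne]
        by_cases he : pvBest rt goal xs (rt + x) = rt + x
        · rw [if_pos he, he]; omega
        · rw [if_neg he]
      · simp only [if_neg h]
        exact ih m s hm hms hs0

theorem getGreedyPick_char (rt goal : Int) (ws : List Int) :
    getGreedyPick rt ws goal
      = if pvBest rt goal ws 0 = 0 then 0 else pvBest rt goal ws 0 - rt := by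
  unfold getGreedyPick
  exact getGreedyPick_loop rt goal ws 0 0 (le_refl 0) (by omega) (fun _ => rfl)

-- B's scan on any descending list computes the same value
theorem pvFirstFeasible_desc (rt goal : Int) (l : List Int)
    (hd : l.Pairwise (fun a b => b ≤ a)) :
    pvFirstFeasible rt goal l
      = if pvBest rt goal l 0 = 0 then 0 else pvBest rt goal l 0 - rt := by
  induction l with
  | nil => simp [pvFirstFeasible, pvBest_nil]
  | cons x xs ih =>
      rw [List.pairwise_cons] at hd
      rw [pvBest_cons]
      by_cases h : 0 < rt + x ∧ rt + x ≤ goal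
      · have hstep : (if rt + x ≤ goal ∧ (0:Int) < rt + x then rt + x else 0) = rt + x := by
          rw [if_pos ⟨h.2, h.1⟩]
        rw [hstep, pvBest_const rt goal xs (rt + x) (fun y hy => by have := hd.1 y hy; omega)]
        rw [pvFirstFeasible, if_pos h, if_neg (by omega)]
        omega
      · have hstep : (if rt + x ≤ goal ∧ (0:Int) < rt + x then rt + x else 0) = 0 := by
          by_cases hc : rt + x ≤ goal ∧ (0:Int) < rt + x
          · exact absurd ⟨hc.2, hc.1⟩ h
          · rw [if_neg hc]
        rw [hstep, pvFirstFeasible, if_neg h]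
        exact ih hd.2

-- ===== VERDICT (by name: the statement is the Claim_ definition above) =====
theorem getGreedyPick_spec : Claim_equal_getGreedyPick := by
  intro rt ws goal _
  unfold Spec_getGreedyPick getGreedyPick_alt
  rw [getGreedyPick_char,
      pvBest_perm rt goal (PySem.List.sorted_perm ws (fun x => x) true).symm 0,
      ← pvFirstFeasible_desc rt goal _ (PySem.List.sorted_pairwise_rev ws (fun x => x))]
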